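-- pv_equiv track=rewrite | github.com/raamtambe/EmmaNeigh | desktop-app/python/execution_version.py | build_match_line_sample
-- ===== SOURCE A (Python) =====
-- MAX_MATCH_TEXT_LINES = 28
--
-- def compress_lines(lines, max_lines=12, max_chars=900):
--     parts = []
--     total_chars = 0
--     for line in lines[:max_lines]:
--         projected = total_chars + len(line) + (3 if parts else 0)
--         if projected > max_chars:
--             break
--         parts.append(line)
--         total_chars = projected
--     return ' | '.join(parts)
--
-- def build_match_line_sample(lines):
--     if not lines:
--         return ''
--     head = lines[:14]
--     tail = lines[-14:] if len(lines) > 14 else []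
--     combined = []
--     seen = set()
--     for line in head + tail:
--         if line and line not in seen:
--             seen.add(line)
--             combined.append(line)
--     return compress_lines(combined, max_lines=MAX_MATCH_TEXT_LINES, max_chars=1400)
-- ===== SOURCE B (Python) =====
-- MAX_MATCH_TEXT_LINES = 28
--
-- def build_match_line_sample(lines):
--     if not lines:
--         return ''
--     head = lines[:14]
--     tail = lines[-14:] if len(lines) > 14 else []
--     seen = set()
--     parts = []
--     total_chars = 0
--     for line in head + tail:
--         if not line or line in seen:
--             continue
--         projected = total_chars + len(line) + (3 if parts else 0)
--         if projected > 1400: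
--             break
--         seen.add(line)
--         parts.append(line)
--         total_chars = projected
--     return ' | '.join(parts)
-- ===== Notes on version B (the rewrite author's own statement) =====
-- stated objective: simpler
-- what changed: Fuses A's two passes (dedup loop building an intermediate 'combined' list, then compress_lines with its char budget) into one loop over head+tail maintaining seen/parts/total_chars, eliminating the intermediate list and the helper entirely.
import Mathlib
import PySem

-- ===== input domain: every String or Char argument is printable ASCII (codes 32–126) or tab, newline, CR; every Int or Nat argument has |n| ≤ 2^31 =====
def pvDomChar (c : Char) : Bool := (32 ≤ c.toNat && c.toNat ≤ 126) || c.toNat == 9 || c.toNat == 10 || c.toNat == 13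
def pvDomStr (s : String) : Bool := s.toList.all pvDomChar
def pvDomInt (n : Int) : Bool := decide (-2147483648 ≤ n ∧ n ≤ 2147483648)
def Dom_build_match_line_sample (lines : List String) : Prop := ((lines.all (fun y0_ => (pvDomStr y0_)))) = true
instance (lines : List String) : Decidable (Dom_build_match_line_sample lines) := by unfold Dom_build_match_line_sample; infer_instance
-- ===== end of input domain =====

-- B fuses A's dedup pass and compress_lines budget pass into one loop (objective: simpler; return value only, no mutation).

-- ===== PORT A =====
-- the 'for line in lines[:max_lines]' loop of compress_lines (parts, total_chars as state; break = return parts)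
def pvCompressGo (max_chars : Int) : List String → List String → Int → List String
  | [], parts, _ => parts
  | l :: ls, parts, total =>
    let projected := total + PySem.Str.len l + (if parts ≠ [] then 3 else 0)
    if projected > max_chars then parts
    else pvCompressGo max_chars ls (parts ++ [l]) projected

def compress_lines (lines : List String) (max_lines : Int) (max_chars : Int) : String :=
  PySem.Str.join " | " (pvCompressGo max_chars (PySem.List.slice lines none (some max_lines)) [] 0)

-- the 'for line in head + tail' dedup loop (seen, combined as state)
def pvDedupGo : List String → PySem.Set String → List String → List String
  | [], _, combined => combined
  | l :: ls, seen, combined =>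
    if l ≠ "" ∧ ¬ PySem.Set.contains seen l then
      pvDedupGo ls (PySem.Set.add seen l) (combined ++ [l])
    else pvDedupGo ls seen combined

def build_match_line_sample (lines : List String) : String :=
  if lines = [] then ""
  else
    let head := PySem.List.slice lines none (some 14)
    let tail := if PySem.List.len lines > 14 then PySem.List.slice lines (some (-14)) none else []
    let combined := pvDedupGo (head ++ tail) PySem.Set.empty []
    compress_lines combined 28 1400

-- ===== PORT B =====
-- single fused loop: skip falsy/seen lines, then apply the char budget, breaking on overflow
def pvFusedGo : List String → PySem.Set String → List String → Int → List String
  | [], _, parts, _ => parts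
  | l :: ls, seen, parts, total =>
    if l = "" ∨ PySem.Set.contains seen l then pvFusedGo ls seen parts total
    else
      let projected := total + PySem.Str.len l + (if parts ≠ [] then 3 else 0)
      if projected > 1400 then parts
      else pvFusedGo ls (PySem.Set.add seen l) (parts ++ [l]) projected

def build_match_line_sample_alt (lines : List String) : String :=
  if lines = [] then ""
  else
    let head := PySem.List.slice lines none (some 14)
    let tail := if PySem.List.len lines > 14 then PySem.List.slice lines (some (-14)) none else []
    PySem.Str.join " | " (pvFusedGo (head ++ tail) PySem.Set.empty [] 0)

-- ===== PRECONDITION & SPEC =====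
def Spec_build_match_line_sample (lines : List String) (out : String) : Prop := out = build_match_line_sample_alt lines
instance (lines : List String) (out : String) : Decidable (Spec_build_match_line_sample lines out) := by unfold Spec_build_match_line_sample; infer_instance

-- ===== CLAIM (what is proved, stated in full; the proofs are below) =====
def Claim_equal_build_match_line_sample : Prop := ∀ (lines : List String), Dom_build_match_line_sample lines → Spec_build_match_line_sample lines (build_match_line_sample lines)

-- ===== LEMMAS AND PROOFS =====

-- the dedup loop only appends to its accumulator
theorem pvDedupGo_acc (L : List String) : ∀ (seen : PySem.Set String) (acc : List String),
    pvDedupGo L seen acc = acc ++ pvDedupGo L seen [] := by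
  induction L with
  | nil => intro seen acc; simp [pvDedupGo]
  | cons l ls ih =>
    intro seen acc
    by_cases h : l ≠ "" ∧ ¬ PySem.Set.contains seen l
    · simp only [pvDedupGo, if_pos h, List.nil_append]
      rw [ih (PySem.Set.add seen l) (acc ++ [l]), ih (PySem.Set.add seen l) [l]]
      simp
    · simp only [pvDedupGo, if_neg h]
      exact ih seen acc

theorem pvDedupGo_len (L : List String) : ∀ (seen : PySem.Set String),
    (pvDedupGo L seen []).length ≤ L.length := by
  induction L with
  | nil => intro seen; simp [pvDedupGo]
  | cons l ls ih =>
    intro seen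
    by_cases h : l ≠ "" ∧ ¬ PySem.Set.contains seen l
    · simp only [pvDedupGo, if_pos h]
      rw [pvDedupGo_acc]
      simpa using Nat.succ_le_succ (ih (PySem.Set.add seen l))
    · simp only [pvDedupGo, if_neg h, List.length_cons]
      exact Nat.le_succ_of_le (ih seen)

-- the fused loop computes the budget pass applied to the dedup pass's output
theorem pvFusedGo_eq (L : List String) : ∀ (seen : PySem.Set String) (parts : List String) (total : Int),
    pvFusedGo L seen parts total = pvCompressGo 1400 (pvDedupGo L seen []) parts total := by
  induction L with
  | nil => intro seen parts total; simp [pvFusedGo, pvDedupGo, pvCompressGo]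
  | cons l ls ih =>
    intro seen parts total
    by_cases h : l = "" ∨ PySem.Set.contains seen l
    · have h' : ¬ (l ≠ "" ∧ ¬ PySem.Set.contains seen l) := by tauto
      simp only [pvFusedGo, if_pos h, pvDedupGo, if_neg h']
      exact ih seen parts total
    · have h' : l ≠ "" ∧ ¬ PySem.Set.contains seen l := by tauto
      simp only [pvFusedGo, if_neg h, pvDedupGo, if_pos h']
      simp only [List.nil_append]
      rw [pvDedupGo_acc ls (PySem.Set.add seen l) [l]]
      simp only [pvCompressGo, List.singleton_append]
      rw [ih (PySem.Set.add seen l) (parts ++ [l])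
            (total + PySem.Str.len l + (if parts ≠ [] then 3 else 0))]

-- ===== VERDICT (by name: the statement is the Claim_ definition above) =====
theorem build_match_line_sample_spec : Claim_equal_build_match_line_sample := by
  intro lines _
  unfold Spec_build_match_line_sample build_match_line_sample build_match_line_sample_alt
  by_cases hnil : lines = []
  · simp [hnil]
  · simp only [if_neg hnil]
    set head := PySem.List.slice lines none (some 14) with hhead
    set tail := if PySem.List.len lines > 14 then PySem.List.slice lines (some (-14)) none else [] with htail
    have hheadlen : head.length ≤ 14 := by
      rw [hhead, PySem.List.slice_to lines (by norm_num)]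
      simp
    have htaillen : tail.length ≤ 14 := by
      rw [htail]
      split
      · rw [PySem.List.slice_from_neg_ofNat lines 14 (by norm_num)]
        simp only [List.length_drop]
        omega
      · simp
    have hcomblen : (pvDedupGo (head ++ tail) PySem.Set.empty []).length ≤ 28 := by
      calc (pvDedupGo (head ++ tail) PySem.Set.empty []).length
          ≤ (head ++ tail).length := pvDedupGo_len _ _
        _ ≤ 28 := by simp only [List.length_append]; omega
    unfold compress_lines
    rw [PySem.List.slice_to _ (by norm_num : (0:Int) ≤ 28)]
    have : (pvDedupGo (head ++ tail) PySem.Set.empty []).take (Int.toNat 28)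
         = pvDedupGo (head ++ tail) PySem.Set.empty [] :=
      List.take_of_length_le (by simpa using hcomblen)
    rw [this, ← pvFusedGo_eq]
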